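-- pv_equiv track=rewrite | github.com/J0aoMath/CodeWars | Square Every Digit.py | square_digits
-- ===== SOURCE A (Python) =====
-- def square_digits(num):
--     result_ = ''
--     result = 0
--     for i in str(num):
--         result_ += str(int(i)*int(i))
--     for i,value in enumerate((result_[::-1])):
--         result += int(value) * 10**i
--     return result
-- ===== SOURCE B (Python) =====
-- def square_digits(num):
--     n, out, place = num, 0, 1
--     while n > 0:
--         sq = (n % 10) ** 2
--         out += sq * place
--         place *= 100 if sq >= 10 else 10
--         n //= 10
--     return out
-- ===== Notes on version B (the rewrite author's own statement) =====
-- stated objective: alternative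
-- what changed: B drops all string processing: instead of building the squared-digit string and re-assembling the integer positionally from its reversed characters, B runs one arithmetic while-loop over num's digits (n % 10, n //= 10), accumulating each square times a running place value that advances by 10 or 100 depending on whether the square has one or two digits.
import Mathlib
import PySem

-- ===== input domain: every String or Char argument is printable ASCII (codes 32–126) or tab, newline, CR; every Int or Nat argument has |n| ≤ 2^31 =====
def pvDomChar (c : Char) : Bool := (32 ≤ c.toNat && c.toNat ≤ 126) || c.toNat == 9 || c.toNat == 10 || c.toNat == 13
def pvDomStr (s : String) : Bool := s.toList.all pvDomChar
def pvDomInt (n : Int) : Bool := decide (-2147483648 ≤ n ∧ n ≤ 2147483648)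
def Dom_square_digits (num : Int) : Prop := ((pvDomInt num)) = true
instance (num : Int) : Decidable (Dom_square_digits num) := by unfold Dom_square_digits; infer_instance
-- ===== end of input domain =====

-- B replaces A's two string passes (build the squared-digit string, then rebuild the integer positionally)
-- by one pure-arithmetic loop over the digits of num itself: no strings at all (objective: faster, constant-factor).

-- ===== PORT A =====
-- int(i) for a one-character string i: Python raises ValueError on a non-digit; Pre_ keeps num ≥ 0 so only digits occur.
def pvIntChar (c : Char) : Int := (PySem.Int.ofChars? [c]).getD 0

-- result_ is the foldl-built string; 10 ** i with i the (nonnegative) enumerate index is ported as 10 ^ i.toNat (exact here)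
def square_digits (num : Int) : Int :=
  (PySem.List.enumerate
      (((PySem.Int.toChars num).foldl
          (fun acc c => acc ++ PySem.Int.toChars (pvIntChar c * pvIntChar c)) []).reverse)).foldl
    (fun acc iv => acc + pvIntChar iv.2 * (10 : Int) ^ iv.1.toNat) 0

-- ===== PORT B =====
-- the while-loop of Source B: state (n, out, place)
def sdLoop (n out place : Int) : Int :=
  if h : 0 < n then
    sdLoop (PySem.Int.floordiv n 10) (out + PySem.Int.mod n 10 ^ 2 * place)
      (place * (if 10 ≤ PySem.Int.mod n 10 ^ 2 then 100 else 10))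
  else out
termination_by n.toNat
decreasing_by
  rw [PySem.Int.floordiv_eq_ediv_of_pos (by norm_num : (0:Int) < 10)]
  omega

def square_digits_alt (num : Int) : Int := sdLoop num 0 1

-- ===== PRECONDITION & SPEC =====
-- Pre_ excludes exactly the inputs where A raises: for num < 0, str(num) starts with '-' and int('-') raises ValueError.
def Pre_square_digits (num : Int) : Prop := 0 ≤ num
instance (num : Int) : Decidable (Pre_square_digits num) := by unfold Pre_square_digits; infer_instance
def pvWitness_square_digits : Int := (9119 : Int)

def Spec_square_digits (num : Int) (out : Int) : Prop := out = square_digits_alt num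
instance (num : Int) (out : Int) : Decidable (Spec_square_digits num out) := by unfold Spec_square_digits; infer_instance

-- ===== CLAIM (what is proved, stated in full; the proofs are below) =====
def Claim_equal_square_digits : Prop :=
  ∀ (num : Int), Dom_square_digits num → Pre_square_digits num →
    Spec_square_digits num (square_digits num)

-- ===== LEMMAS AND PROOFS =====

-- little-endian value of a digit-character list (head is the units digit)
def valLE : List Char → Int
  | [] => 0
  | c :: t => pvIntChar c + 10 * valLE t

-- the common digit recursion both programs compute
def mid (n : Nat) : Int :=
  if h : n = 0 then 0
  else
    ((n % 10 : Nat) : Int) ^ 2 +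
      (if 10 ≤ ((n % 10 : Nat) : Int) ^ 2 then 100 else 10) * mid (n / 10)
decreasing_by exact Nat.div_lt_self (Nat.pos_of_ne_zero h) (by norm_num)

theorem sdLoop_eq (k : Nat) : ∀ n : Int, n.toNat = k → 0 ≤ n → ∀ out place : Int,
    sdLoop n out place = out + place * mid n.toNat := by
  induction k using Nat.strong_induction_on with
  | _ k ih =>
    intro n hk hn out place
    rw [sdLoop]
    by_cases h : 0 < n
    · simp only [h, dif_pos]
      have h10 : (0:Int) < 10 := by norm_num
      rw [PySem.Int.mod_eq_emod_of_pos h10, PySem.Int.floordiv_eq_ediv_of_pos h10]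
      have hdiv : (n / 10).toNat = n.toNat / 10 := by omega
      have hmod : n % 10 = ((n.toNat % 10 : Nat) : Int) := by omega
      have hne : n.toNat ≠ 0 := by omega
      rw [mid, dif_neg hne]
      rw [ih (n / 10).toNat (by omega) _ rfl (by omega)]
      rw [hdiv, hmod]
      ring
    · simp only [h, dif_neg, not_false_iff]
      have : n = 0 := by omega
      subst this
      simp [mid]

-- A's second loop computes valLE of the (reversed) string
theorem foldl_enum (l : List Char) : ∀ (s acc : Int), 0 ≤ s →
    (PySem.List.enumerate l s).foldl
        (fun a iv => a + pvIntChar iv.2 * (10 : Int) ^ iv.1.toNat) acc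
      = acc + (10 : Int) ^ s.toNat * valLE l := by
  induction l with
  | nil => intro s acc _; simp [PySem.List.enumerate_nil, valLE]
  | cons c t ih =>
    intro s acc hs
    rw [PySem.List.enumerate_cons, List.foldl_cons, ih (s + 1) _ (by omega)]
    have h1 : (s + 1).toNat = s.toNat + 1 := by omega
    rw [h1, valLE, pow_succ]
    ring

theorem valLE_append (a b : List Char) :
    valLE (a ++ b) = valLE a + (10 : Int) ^ a.length * valLE b := by
  induction a with
  | nil => simp [valLE]
  | cons c t ih => simp [valLE, ih, pow_succ]; ring

-- per-digit facts (d < 10), by computation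
theorem pvIntChar_digitChar (d : Nat) (hd : d < 10) :
    pvIntChar (Nat.digitChar d) = (d : Int) := by
  interval_cases d <;> decide

theorem valLE_sq (d : Nat) (hd : d < 10) :
    valLE ((PySem.Int.toChars ((d : Int) * (d : Int))).reverse) = (d : Int) * (d : Int) := by
  interval_cases d <;> decide

theorem len_sq (d : Nat) (hd : d < 10) :
    ((PySem.Int.toChars ((d : Int) * (d : Int))).length : Int)
      = if 10 ≤ ((d : Int) : Int) ^ 2 then 2 else 1 := by
  interval_cases d <;> decide

-- Nat.toDigitsCore: the accumulator is just appended
theorem tdc_acc (f : Nat) : ∀ (n : Nat) (acc : List Char),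
    Nat.toDigitsCore 10 f n acc = Nat.toDigitsCore 10 f n [] ++ acc := by
  induction f with
  | zero => intro n acc; simp [Nat.toDigitsCore]
  | succ f ih =>
    intro n acc
    simp only [Nat.toDigitsCore]
    by_cases h : n / 10 = 0
    · simp [h]
    · simp only [h, if_false]
      rw [ih (n / 10) (Nat.digitChar (n % 10) :: acc),
          ih (n / 10) [Nat.digitChar (n % 10)]]
      simp

-- Nat.toDigits agrees with Mathlib's Nat.digits (big-endian via reverse), for positive n
theorem tdc_digits (f : Nat) : ∀ n : Nat, n < f → 0 < n →
    Nat.toDigitsCore 10 f n [] = ((Nat.digits 10 n).map Nat.digitChar).reverse := by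
  induction f with
  | zero => intro n hf _; omega
  | succ f ih =>
    intro n hf hn
    simp only [Nat.toDigitsCore]
    rw [Nat.digits_def' (by norm_num : 1 < 10) hn]
    by_cases h : n / 10 = 0
    · have hz : Nat.digits 10 (n / 10) = [] := by rw [h]; simp
      simp [h]
    · simp only [h, if_false]
      rw [tdc_acc, ih (n / 10) (by omega) (by omega)]
      simp

theorem toChars_pos (n : Nat) (hn : 0 < n) :
    PySem.Int.toChars (n : Int) = ((Nat.digits 10 n).map Nat.digitChar).reverse := by
  have : ¬ ((n : Int) < 0) := by omega
  simp only [PySem.Int.toChars, this, if_false, Int.toNat_natCast]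
  exact tdc_digits (n + 1) n (by omega) hn

-- the big-endian squared-digit string, read little-endian, is the digit recursion mid
theorem valLE_flatMap (k : Nat) : ∀ n : Nat, n = k →
    valLE ((Nat.digits 10 n).flatMap
      (fun (d : Nat) =>
        (PySem.Int.toChars (pvIntChar (Nat.digitChar d) * pvIntChar (Nat.digitChar d))).reverse))
      = mid n := by
  induction k using Nat.strong_induction_on with
  | _ k ih =>
    intro n hk
    subst hk
    by_cases hn : n = 0
    · subst hn; simp [valLE, mid]
    · rw [Nat.digits_def' (by norm_num : 1 < 10) (Nat.pos_of_ne_zero hn)]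
      rw [List.flatMap_cons, valLE_append, List.length_reverse]
      have hd : n % 10 < 10 := Nat.mod_lt _ (by norm_num)
      rw [pvIntChar_digitChar _ hd]
      conv_rhs => rw [mid, dif_neg hn]
      rw [valLE_sq _ hd, ih (n / 10) (Nat.div_lt_self (Nat.pos_of_ne_zero hn) (by norm_num)) _ rfl]
      have hlen := len_sq (n % 10) hd
      by_cases hsq : 10 ≤ ((n % 10 : Nat) : Int) ^ 2
      · simp only [hsq, if_pos] at hlen ⊢
        have : (PySem.Int.toChars (((n % 10 : Nat) : Int) * ((n % 10 : Nat) : Int))).length = 2 := by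
          omega
        rw [this]
        ring
      · simp only [hsq, if_neg, not_false_iff] at hlen ⊢
        have : (PySem.Int.toChars (((n % 10 : Nat) : Int) * ((n % 10 : Nat) : Int))).length = 1 := by
          omega
        rw [this]
        ring

-- ===== VERDICT (by name: the statement is the Claim_ definition above) =====
theorem square_digits_spec : Claim_equal_square_digits := by
  unfold Claim_equal_square_digits
  intro num _ hpre
  unfold Spec_square_digits square_digits square_digits_alt
  rw [sdLoop_eq num.toNat num rfl hpre]
  by_cases h0 : num = 0
  · subst h0
    rw [show (0 : Int).toNat = 0 from rfl, mid]
    norm_num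
    decide
  · have hpre' : (0 : Int) ≤ num := hpre
    have hn : 0 < num.toNat := by omega
    have hnum : ((num.toNat : Nat) : Int) = num := by omega
    rw [PySem.List.foldl_append_eq_flatMap, foldl_enum _ 0 0 (by norm_num)]
    rw [← hnum, toChars_pos num.toNat hn]
    simp only [List.nil_append, Int.toNat_natCast]
    rw [List.reverse_flatMap, List.reverse_reverse, List.flatMap_map]
    simp only [Function.comp_def]
    rw [valLE_flatMap num.toNat num.toNat rfl]
    norm_num
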